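-- pv_equiv track=rewrite | github.com/Bailejd/Advent-of-Code | 2021/10/10.py | part_one
-- ===== SOURCE A (Python) =====
-- def part_one(data_list):
--     errors = []
--     error_score = 0
--     for line in data_list:
--         stack = []
--         for char in line:
--             if(char == '(' or char == '[' or char == '{' or char == '<'):
--                 stack.append(char)
--             else:
--                 last = stack[-1]
--                 if(last == '(' and char == ')'):
--                     stack.pop()
--                 elif(last == '[' and char == ']'):
--                     stack.pop()
--                 elif(last == '{' and char == '}'):
--                     stack.pop()
--                 elif(last == '<' and char == '>'):
--                     stack.pop()
--                 else:
--                     errors.append(char)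
--                     break
--
--     for error in errors:
--         if(error == ')'):
--             error_score += 3
--         elif(error == ']'):
--             error_score += 57
--         elif(error == '}'):
--             error_score += 1197
--         else:
--             error_score += 25137
--
--     return error_score
-- ===== SOURCE B (Python) =====
-- def part_one(data_list):
--     openers = '([{<'
--     pairs = {'()', '[]', '{}', '<>'}
--     scores = {')': 3, ']': 57, '}': 1197}
--
--     def score(line):
--         # leftmost cancellation: find the first non-opening character, pop the
--         # nearest preceding opener, and either delete the matched pair and
--         # recurse on the shortened string, or score the offending character
--         i = next((k for k, c in enumerate(line) if c not in openers), -1)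
--         if i < 0:
--             return 0
--         before = list(line[:i])
--         prev = before.pop()
--         if prev + line[i] in pairs:
--             return score(''.join(before) + line[i + 1:])
--         return scores.get(line[i], 25137)
--
--     return sum(score(line) for line in data_list)
-- ===== Notes on version B (the rewrite author's own statement) =====
-- stated objective: alternative
-- what changed: B keeps no stack and no errors list: per line it recursively cancels the leftmost non-opening character against the nearest preceding opener (popped from the prefix) by string slicing — deleting the matched pair and recursing on the shortened string, or scoring the offending character via a dict and stopping — and sums the per-line scores, instead of A's single left-to-right stack scan followed by a second scoring loop over collected error characters.
import Mathlib
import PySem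

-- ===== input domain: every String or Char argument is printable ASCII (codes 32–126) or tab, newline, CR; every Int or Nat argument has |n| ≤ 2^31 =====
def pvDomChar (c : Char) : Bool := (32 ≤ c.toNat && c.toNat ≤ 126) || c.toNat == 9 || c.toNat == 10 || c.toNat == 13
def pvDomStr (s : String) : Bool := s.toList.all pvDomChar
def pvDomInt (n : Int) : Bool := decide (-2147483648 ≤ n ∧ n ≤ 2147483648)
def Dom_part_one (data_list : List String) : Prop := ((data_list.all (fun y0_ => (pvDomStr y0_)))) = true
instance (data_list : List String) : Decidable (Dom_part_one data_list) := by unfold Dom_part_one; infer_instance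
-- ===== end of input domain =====

-- B replaces A's stack scan + separate scoring loop by stackless recursive leftmost-pair
-- cancellation on the string (delete the first matched closer and recurse, else score it)
-- (objective: alternative).


-- ===== PORT A =====
-- inner loop of A over one line: stack (top at head), remaining chars; returns the error
-- char appended by the `break` branch, or none if the line finishes without one.
-- Python's `stack[-1]` on an empty stack raises IndexError: that input is excluded by
-- Pre_part_one below; here the port arbitrarily returns none in that (excluded) case.
def pvLineErrA : List Char → List Char → Option Char
  | _, [] => none
  | stack, c :: rest =>
    if c = '(' ∨ c = '[' ∨ c = '{' ∨ c = '<' then pvLineErrA (c :: stack) rest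
    else
      match stack with
      | [] => none
      | last :: s' =>
        if last = '(' ∧ c = ')' then pvLineErrA s' rest
        else if last = '[' ∧ c = ']' then pvLineErrA s' rest
        else if last = '{' ∧ c = '}' then pvLineErrA s' rest
        else if last = '<' ∧ c = '>' then pvLineErrA s' rest
        else some c

def part_one (data_list : List String) : Int :=
  let errors : List Char := data_list.foldl (fun errs line =>
    match pvLineErrA [] line.toList with
    | some c => errs ++ [c]
    | none => errs) []
  errors.foldl (fun error_score error =>
    if error = ')' then error_score + 3
    else if error = ']' then error_score + 57
    else if error = '}' then error_score + 1197
    else error_score + 25137) 0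

-- ===== PORT B =====
-- `c not in '([{<'`, expanded per character
def pvIsOpener (c : Char) : Bool := c = '(' || c = '[' || c = '{' || c = '<'

-- `line[i-1] + line[i] in {'()', '[]', '{}', '<>'}`, expanded per element of the set
def pvIsPair (a b : Char) : Bool :=
  (a = '(' && b = ')') || (a = '[' && b = ']') || (a = '{' && b = '}') || (a = '<' && b = '>')

def pvScoresB : PySem.Dict Char Int := PySem.Dict.ofList [((')' : Char), (3 : Int)), (']', 57), ('}', 1197)]

-- `next((k for k, c in enumerate(line) if c not in openers), -1)`, with -1 as none
def pvFirstNonOpen : List Char → Option Nat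
  | [] => none
  | c :: rest => if pvIsOpener c then (pvFirstNonOpen rest).map (· + 1) else some 0

lemma pvFirstNonOpen_lt_length (l : List Char) (i : Nat) :
    pvFirstNonOpen l = some i → i < l.length := by
  induction l generalizing i with
  | nil => simp [pvFirstNonOpen]
  | cons c rest ih =>
    intro h
    simp only [pvFirstNonOpen] at h
    split_ifs at h with hc
    · cases hj : pvFirstNonOpen rest with
      | none => rw [hj] at h; simp at h
      | some j =>
        rw [hj] at h
        simp only [Option.map_some, Option.some.injEq] at h
        have := ih j hj
        simp only [List.length_cons]
        omega
    · simp only [Option.some.injEq] at h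
      subst h
      simp

-- Source B's `score`: find the first non-opener, pop the nearest preceding opener
-- (before = list(line[:i]); prev = before.pop()), and either delete the matched
-- pair and recurse, or score the offending character from the dict.
-- `before.pop()` on an empty list raises IndexError in Python (exactly A's
-- IndexError inputs, excluded by Pre_part_one); the port scores the character there.
-- `line[i]` is always in range (i < len(line)); getD uses a never-reached dummy default.
def pvScoreB (l : List Char) : Int :=
  match h : pvFirstNonOpen l with
  | none => 0
  | some i =>
    match hp : PySem.List.pop? (l.take i) with
    | none => PySem.Dict.getD pvScoresB (l.getD i ' ') 25137
    | some (prev, before) =>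
      if pvIsPair prev (l.getD i ' ') then
        pvScoreB (before ++ l.drop (i + 1))
      else
        PySem.Dict.getD pvScoresB (l.getD i ' ') 25137
termination_by l.length
decreasing_by
  have h1 := pvFirstNonOpen_lt_length l i h
  have h2 := PySem.List.length_of_pop?_eq_some _ hp
  simp only [List.length_take] at h2
  simp only [List.length_append, List.length_drop]
  omega

def part_one_alt (data_list : List String) : Int :=
  (data_list.map (fun line => pvScoreB line.toList)).sum

-- ===== PRECONDITION & SPEC =====
-- A raises IndexError (stack[-1] on an empty stack) when a non-opening character arrives
-- while the stack is empty, before any earlier mismatch ended the line; Pre_ excludes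
-- exactly those inputs.  pvSafeLine tracks only the stack, not any score.
def pvSafeLine : List Char → List Char → Bool
  | _, [] => true
  | stack, c :: rest =>
    if c = '(' ∨ c = '[' ∨ c = '{' ∨ c = '<' then pvSafeLine (c :: stack) rest
    else
      match stack with
      | [] => false
      | last :: s' =>
        if (last = '(' ∧ c = ')') ∨ (last = '[' ∧ c = ']') ∨
           (last = '{' ∧ c = '}') ∨ (last = '<' ∧ c = '>') then pvSafeLine s' rest
        else true

def Pre_part_one (data_list : List String) : Prop :=
  ∀ line ∈ data_list, pvSafeLine [] line.toList = true
instance (data_list : List String) : Decidable (Pre_part_one data_list) := by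
  unfold Pre_part_one; infer_instance

def pvWitness_part_one : List String := ["([)", "{()()>", "<>"]

def Spec_part_one (data_list : List String) (out : Int) : Prop := out = part_one_alt data_list
instance (data_list : List String) (out : Int) : Decidable (Spec_part_one data_list out) := by
  unfold Spec_part_one; infer_instance

-- ===== CLAIM (what is proved, stated in full; the proofs are below) =====
def Claim_equal_part_one : Prop := ∀ (data_list : List String), Dom_part_one data_list → Pre_part_one data_list → Spec_part_one data_list (part_one data_list)

-- ===== LEMMAS AND PROOFS =====

-- score A assigns to an error character (the second loop's body)
def pvScoreA (c : Char) : Int :=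
  if c = ')' then 3 else if c = ']' then 57 else if c = '}' then 1197 else 25137

lemma pvScores_items : pvScoresB.items = [((')' : Char), (3 : Int)), (']', 57), ('}', 1197)] := by
  decide

lemma pvScoreA_eq_getD (c : Char) : pvScoreA c = PySem.Dict.getD pvScoresB c 25137 := by
  by_cases h1 : c = ')'
  · subst h1; decide
  by_cases h2 : c = ']'
  · subst h2; decide
  by_cases h3 : c = '}'
  · subst h3; decide
  have b1 : ((')' : Char) == c) = false := beq_eq_false_iff_ne.mpr (Ne.symm h1)
  have b2 : ((']' : Char) == c) = false := beq_eq_false_iff_ne.mpr (Ne.symm h2)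
  have b3 : (('}' : Char) == c) = false := beq_eq_false_iff_ne.mpr (Ne.symm h3)
  simp [pvScoreA, PySem.Dict.getD, PySem.Dict.get?, pvScores_items, List.find?, b1, b2, b3,
    h1, h2, h3]

lemma pvFirstNonOpen_all_openers (l : List Char) (h : ∀ c ∈ l, pvIsOpener c = true) :
    pvFirstNonOpen l = none := by
  induction l with
  | nil => rfl
  | cons c rest ih =>
    have hc := h c (by simp)
    simp [pvFirstNonOpen, hc, ih (fun d hd => h d (by simp [hd]))]

lemma pvFirstNonOpen_split (p : List Char) (c : Char) (t : List Char)
    (hp : ∀ d ∈ p, pvIsOpener d = true) (hc : pvIsOpener c = false) :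
    pvFirstNonOpen (p ++ c :: t) = some p.length := by
  induction p with
  | nil => simp [pvFirstNonOpen, hc]
  | cons a p ih =>
    have ha := hp a (by simp)
    simp [pvFirstNonOpen, ha, ih (fun d hd => hp d (by simp [hd]))]

-- unfolding lemmas for pvScoreB (well-founded recursion)
lemma pvScoreB_none (l : List Char) (h : pvFirstNonOpen l = none) : pvScoreB l = 0 := by
  rw [pvScoreB.eq_def]; split <;> simp_all

lemma pvScoreB_some_pop (l : List Char) (i : Nat) (prev : Char) (before : List Char)
    (h : pvFirstNonOpen l = some i)
    (hp : PySem.List.pop? (l.take i) = some (prev, before)) :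
    pvScoreB l =
      if pvIsPair prev (l.getD i ' ') then
        pvScoreB (before ++ l.drop (i + 1))
      else
        PySem.Dict.getD pvScoresB (l.getD i ' ') 25137 := by
  rw [pvScoreB.eq_def]
  split
  · simp_all
  · split <;> simp_all

-- per-line agreement: under pvSafeLine, A's stack scan with stack s (all openers)
-- computes the same score as B's leftmost cancellation on s.reverse ++ rest.
lemma pvLine_agree (rest : List Char) : ∀ stack : List Char,
    (∀ c ∈ stack, pvIsOpener c = true) →
    pvSafeLine stack rest = true →
    (match pvLineErrA stack rest with
     | some c => pvScoreA c
     | none => 0) = pvScoreB (stack.reverse ++ rest) := by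
  induction rest with
  | nil =>
    intro stack hst _
    simp only [List.append_nil]
    rw [pvScoreB_none _ (pvFirstNonOpen_all_openers _ (by simpa using hst))]
    simp [pvLineErrA]
  | cons c rest ih =>
    intro stack hst hsafe
    by_cases hop : c = '(' ∨ c = '[' ∨ c = '{' ∨ c = '<'
    · have hopb : pvIsOpener c = true := by
        rcases hop with h | h | h | h <;> simp [pvIsOpener, h]
      have : stack.reverse ++ c :: rest = (c :: stack).reverse ++ rest := by simp
      rw [this]
      simp only [pvLineErrA, hop, if_true]
      refine ih (c :: stack) ?_ ?_
      · intro d hd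
        rcases List.mem_cons.mp hd with h | h
        · subst h; exact hopb
        · exact hst d h
      · simp only [pvSafeLine] at hsafe; simpa [hop] using hsafe
    · have hopb : pvIsOpener c = false := by
        simp only [pvIsOpener]
        rw [not_or, not_or, not_or] at hop
        obtain ⟨h1, h2, h3, h4⟩ := hop
        simp [h1, h2, h3, h4]
      simp only [pvSafeLine] at hsafe
      simp only [hop, if_false] at hsafe
      cases stack with
      | nil => simp at hsafe
      | cons topc s' =>
        have hsafe' : (if (topc = '(' ∧ c = ')') ∨ (topc = '[' ∧ c = ']') ∨
            (topc = '{' ∧ c = '}') ∨ (topc = '<' ∧ c = '>') then pvSafeLine s' rest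
            else true) = true := hsafe
        have hs'op : ∀ d ∈ s', pvIsOpener d = true := fun d hd => hst d (by simp [hd])
        have hlform : (topc :: s').reverse ++ c :: rest
            = (s'.reverse ++ [topc]) ++ c :: rest := by simp
        have hform2 : (topc :: s').reverse ++ c :: rest
            = s'.reverse ++ (topc :: c :: rest) := by simp
        have hallop : ∀ d ∈ s'.reverse ++ [topc], pvIsOpener d = true := by
          intro e he
          rcases List.mem_append.mp he with h | h
          · exact hs'op e (List.mem_reverse.mp h)
          · simp only [List.mem_singleton] at h
            rw [h]
            exact hst topc (by simp)
        have hfi : pvFirstNonOpen ((topc :: s').reverse ++ c :: rest) = some (s'.length + 1) := by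
          rw [hlform, pvFirstNonOpen_split _ c _ hallop hopb]
          simp
        have htake : ((topc :: s').reverse ++ c :: rest).take (s'.length + 1)
            = s'.reverse ++ [topc] := by
          rw [hlform]
          have hlen : (s'.reverse ++ [topc]).length = s'.length + 1 := by simp
          rw [← hlen, List.take_left]
        have hpop : PySem.List.pop? (((topc :: s').reverse ++ c :: rest).take (s'.length + 1))
            = some (topc, s'.reverse) := by
          rw [htake]
          exact PySem.List.pop?_last _ _
        have hget2 : ((topc :: s').reverse ++ c :: rest).getD (s'.length + 1) ' ' = c := by
          rw [hform2, List.getD]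
          rw [List.getElem?_append_right (by simp)]
          simp
        by_cases hm : (topc = '(' ∧ c = ')') ∨ (topc = '[' ∧ c = ']') ∨
            (topc = '{' ∧ c = '}') ∨ (topc = '<' ∧ c = '>')
        · have hpair : pvIsPair topc c = true := by
            rcases hm with ⟨h1, h2⟩ | ⟨h1, h2⟩ | ⟨h1, h2⟩ | ⟨h1, h2⟩ <;> simp [pvIsPair, h1, h2]
          have hs' : pvSafeLine s' rest = true := by
            rw [if_pos hm] at hsafe'
            exact hsafe'
          have hdrop : ((topc :: s').reverse ++ c :: rest).drop (s'.length + 1 + 1) = rest := by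
            have h3 : (topc :: s').reverse ++ c :: rest = (s'.reverse ++ [topc, c]) ++ rest := by simp
            rw [h3]
            have hl2 : (s'.reverse ++ [topc, c]).length = s'.length + 1 + 1 := by simp
            rw [← hl2, List.drop_left]
          rw [pvScoreB_some_pop _ _ _ _ hfi hpop]
          rw [if_pos (by rw [hget2]; exact hpair), hdrop]
          have hA : pvLineErrA (topc :: s') (c :: rest) = pvLineErrA s' rest := by
            simp only [pvLineErrA, hop, if_false]
            rcases hm with ⟨h1, h2⟩ | ⟨h1, h2⟩ | ⟨h1, h2⟩ | ⟨h1, h2⟩ <;> subst h1 <;> subst h2 <;> simp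
          rw [hA]
          exact ih s' hs'op hs'
        · have hpair : pvIsPair topc c = false := by
            simp only [pvIsPair]
            rw [not_or, not_or, not_or] at hm
            obtain ⟨h1, h2, h3, h4⟩ := hm
            rcases Decidable.not_and_iff_or_not.mp h1 with h | h <;>
            rcases Decidable.not_and_iff_or_not.mp h2 with g | g <;>
            rcases Decidable.not_and_iff_or_not.mp h3 with k | k <;>
            rcases Decidable.not_and_iff_or_not.mp h4 with m | m <;>
              simp [h, g, k, m]
          rw [pvScoreB_some_pop _ _ _ _ hfi hpop]
          rw [if_neg (by rw [hget2]; simp [hpair]), hget2]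
          have hA : pvLineErrA (topc :: s') (c :: rest) = some c := by
            rw [not_or, not_or, not_or] at hm
            obtain ⟨h1, h2, h3, h4⟩ := hm
            simp only [pvLineErrA, hop, if_false]
            rw [if_neg h1, if_neg h2, if_neg h3, if_neg h4]
          rw [hA]
          exact pvScoreA_eq_getD c

-- A's two folds equal the sum of per-line scores
lemma pvFold_sum (lines : List String) : ∀ errs : List Char,
    (∀ line ∈ lines, pvSafeLine [] line.toList = true) →
    (lines.foldl (fun errs line =>
        match pvLineErrA [] line.toList with
        | some c => errs ++ [c]
        | none => errs) errs).foldl (fun s e => if e = ')' then s + 3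
          else if e = ']' then s + 57 else if e = '}' then s + 1197 else s + 25137) 0
      = errs.foldl (fun s e => if e = ')' then s + 3
          else if e = ']' then s + 57 else if e = '}' then s + 1197 else s + 25137) 0
        + (lines.map (fun line => pvScoreB line.toList)).sum := by
  induction lines with
  | nil => intro errs _; simp
  | cons line rest ih =>
    intro errs hsafe
    have hline := pvLine_agree line.toList [] (by simp) (hsafe line (by simp))
    have hrest : ∀ l ∈ rest, pvSafeLine [] l.toList = true := fun l hl => hsafe l (by simp [hl])
    simp only [List.foldl_cons, List.map_cons, List.sum_cons]
    simp only [List.reverse_nil, List.nil_append] at hline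
    cases herr : pvLineErrA [] line.toList with
    | none =>
      rw [ih errs hrest]
      have hl : (0 : Int) = pvScoreB line.toList := by rw [herr] at hline; exact hline
      rw [← hl]; ring
    | some c =>
      rw [ih (errs ++ [c]) hrest, List.foldl_append]
      have hl : pvScoreA c = pvScoreB line.toList := by rw [herr] at hline; exact hline
      simp only [List.foldl_cons, List.foldl_nil]
      rw [← hl]
      unfold pvScoreA
      split_ifs <;> ring

-- ===== VERDICT (by name: the statement is the Claim_ definition above) =====
theorem part_one_spec : Claim_equal_part_one := by
  intro data_list _ hpre
  unfold Spec_part_one part_one part_one_alt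
  simpa using pvFold_sum data_list [] hpre
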